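-- pv_equiv track=rewrite | github.com/ViperJuice/Code-Index-MCP | scripts/index-artifact-download-v2.py | categorize_artifacts
-- ===== SOURCE A (Python) =====
-- from typing import Dict, Any, Optional, List, Tuple
--
-- def categorize_artifacts(artifacts: List[Dict[str, Any]], current_hash: str) -> Dict[str, List[Dict[str, Any]]]:
--     """Categorize artifacts by compatibility."""
--     categories = {
--         'compatible': [],
--         'incompatible': [],
--         'unknown': []
--     }
--
--     for artifact in artifacts:
--         name = artifact['name']
--
--         # Extract compatibility hash from name (index-{hash}-{commit}-{timestamp})
--         parts = name.split('-')
--         if len(parts) >= 4 and parts[0] == 'index':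
--             artifact_hash = parts[1]
--
--             if artifact_hash == current_hash:
--                 categories['compatible'].append(artifact)
--             else:
--                 categories['incompatible'].append(artifact)
--         else:
--             categories['unknown'].append(artifact)
--
--     return categories
-- ===== SOURCE B (Python) =====
-- def categorize_artifacts(artifacts, current_hash):
--     """Categorize artifacts by compatibility (three filtering passes)."""
--     def parts(a):
--         return a['name'].split('-')
--
--     def is_index(a):
--         p = parts(a)
--         return len(p) >= 4 and p[0] == 'index'
--
--     return {
--         'compatible': [a for a in artifacts if is_index(a) and parts(a)[1] == current_hash],
--         'incompatible': [a for a in artifacts if is_index(a) and parts(a)[1] != current_hash],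
--         'unknown': [a for a in artifacts if not is_index(a)],
--     }
-- ===== Notes on version B (the rewrite author's own statement) =====
-- stated objective: idiomatic
-- what changed: Replaces the single accumulating loop that mutates a pre-built category dict with three independent filtering comprehensions (one per category) built from a small is_index predicate, constructing the result dict directly.
import Mathlib
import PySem

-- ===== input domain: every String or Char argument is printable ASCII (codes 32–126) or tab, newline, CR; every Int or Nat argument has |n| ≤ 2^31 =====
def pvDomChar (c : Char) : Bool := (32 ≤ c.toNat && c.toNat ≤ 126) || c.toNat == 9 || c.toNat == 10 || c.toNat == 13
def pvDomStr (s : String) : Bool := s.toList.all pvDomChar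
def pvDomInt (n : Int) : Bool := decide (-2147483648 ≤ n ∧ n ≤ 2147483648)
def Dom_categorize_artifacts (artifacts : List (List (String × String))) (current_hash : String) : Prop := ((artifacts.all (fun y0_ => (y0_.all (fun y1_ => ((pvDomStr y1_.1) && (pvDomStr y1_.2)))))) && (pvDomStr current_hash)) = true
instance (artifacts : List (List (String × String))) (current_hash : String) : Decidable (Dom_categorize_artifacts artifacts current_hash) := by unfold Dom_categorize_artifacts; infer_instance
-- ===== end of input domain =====

-- B replaces A's single accumulating loop over a mutated category dict with three
-- independent filtering passes built from an is_index predicate (objective: idiomatic).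
-- Equivalence is about the return value; neither version mutates its arguments.

-- ===== PORT A =====
-- artifact['name']: first-match lookup; outside Pre_ (key absent, Python KeyError) the
-- port's getD default "" is never relied on — nothing is claimed there.
def pvStepA (current_hash : String)
    (cats : PySem.Dict String (List (List (String × String))))
    (artifact : List (String × String)) : PySem.Dict String (List (List (String × String))) :=
  let name := (PySem.Dict.mk artifact).getD "name" ""
  let parts := (PySem.Str.split? name "-").getD []   -- sep "-" ≠ "": split? is always some
  if 4 ≤ parts.length ∧ parts.headD "" = "index" then
    let artifact_hash := PySem.List.pyGetD parts 1 ""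
    if artifact_hash = current_hash then
      cats.modify "compatible" [] (· ++ [artifact])
    else
      cats.modify "incompatible" [] (· ++ [artifact])
  else
    cats.modify "unknown" [] (· ++ [artifact])

def categorize_artifacts (artifacts : List (List (String × String))) (current_hash : String) : List (String × List (List (String × String))) :=
  (artifacts.foldl (pvStepA current_hash)
    (PySem.Dict.mk [("compatible", []), ("incompatible", []), ("unknown", [])])).items

-- ===== PORT B =====
def pvParts (a : List (String × String)) : List String :=
  (PySem.Str.split? ((PySem.Dict.mk a).getD "name" "") "-").getD []

def pvIsIndex (a : List (String × String)) : Bool :=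
  let p := pvParts a
  4 ≤ p.length && p.headD "" == "index"

def categorize_artifacts_alt (artifacts : List (List (String × String))) (current_hash : String) : List (String × List (List (String × String))) :=
  [("compatible", artifacts.filter (fun a => pvIsIndex a && PySem.List.pyGetD (pvParts a) 1 "" == current_hash)),
   ("incompatible", artifacts.filter (fun a => pvIsIndex a && PySem.List.pyGetD (pvParts a) 1 "" != current_hash)),
   ("unknown", artifacts.filter (fun a => !pvIsIndex a))]

-- ===== PRECONDITION & SPEC =====
-- Pre_ excludes exactly the artifacts without a 'name' key, on which Python A (and B) raise KeyError.
def Pre_categorize_artifacts (artifacts : List (List (String × String))) (current_hash : String) : Prop :=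
  ∀ a ∈ artifacts, a.any (fun p => p.1 == "name") = true
instance (artifacts : List (List (String × String))) (current_hash : String) : Decidable (Pre_categorize_artifacts artifacts current_hash) := by unfold Pre_categorize_artifacts; infer_instance

def pvWitness_categorize_artifacts : (List (List (String × String))) × String :=
  ([[("name", "index-h1-c0-20")], [("name", "index-h2-c0-20")], [("name", "readme")]], "h1")

def Spec_categorize_artifacts (artifacts : List (List (String × String))) (current_hash : String) (out : List (String × List (List (String × String)))) : Prop := out = categorize_artifacts_alt artifacts current_hash
instance (artifacts : List (List (String × String))) (current_hash : String) (out : List (String × List (List (String × String)))) : Decidable (Spec_categorize_artifacts artifacts current_hash out) := by unfold Spec_categorize_artifacts; infer_instance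

-- ===== CLAIM (what is proved, stated in full; the proofs are below) =====
def Claim_equal_categorize_artifacts : Prop := ∀ (artifacts : List (List (String × String))) (current_hash : String), Dom_categorize_artifacts artifacts current_hash → Pre_categorize_artifacts artifacts current_hash → Spec_categorize_artifacts artifacts current_hash (categorize_artifacts artifacts current_hash)

-- ===== LEMMAS AND PROOFS =====

-- modify on the literal three-key dict, one lemma per key
theorem pvModC (f : List (List (String × String)) → List (List (String × String)))
    (xs ys zs : List (List (String × String))) :
    (PySem.Dict.mk [("compatible", xs), ("incompatible", ys), ("unknown", zs)]).modify "compatible" [] f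
    = PySem.Dict.mk [("compatible", f xs), ("incompatible", ys), ("unknown", zs)] := by
  simp [pysem, PySem.Dict.modify, PySem.Dict.insert, PySem.Dict.getD, PySem.Dict.get?, PySem.Dict.contains]

theorem pvModI (f : List (List (String × String)) → List (List (String × String)))
    (xs ys zs : List (List (String × String))) :
    (PySem.Dict.mk [("compatible", xs), ("incompatible", ys), ("unknown", zs)]).modify "incompatible" [] f
    = PySem.Dict.mk [("compatible", xs), ("incompatible", f ys), ("unknown", zs)] := by
  simp [pysem, PySem.Dict.modify, PySem.Dict.insert, PySem.Dict.getD, PySem.Dict.get?, PySem.Dict.contains]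

theorem pvModU (f : List (List (String × String)) → List (List (String × String)))
    (xs ys zs : List (List (String × String))) :
    (PySem.Dict.mk [("compatible", xs), ("incompatible", ys), ("unknown", zs)]).modify "unknown" [] f
    = PySem.Dict.mk [("compatible", xs), ("incompatible", ys), ("unknown", f zs)] := by
  simp [pysem, PySem.Dict.modify, PySem.Dict.insert, PySem.Dict.getD, PySem.Dict.get?, PySem.Dict.contains]

-- Loop invariant: folding A's step over l, starting from the three-key dict with
-- accumulated lists xs/ys/zs, appends exactly B's three filters of l.
theorem pvFold_inv (current_hash : String) (l : List (List (String × String)))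
    (xs ys zs : List (List (String × String))) :
    (l.foldl (pvStepA current_hash)
      (PySem.Dict.mk [("compatible", xs), ("incompatible", ys), ("unknown", zs)]))
    = PySem.Dict.mk
        [("compatible", xs ++ l.filter (fun a => pvIsIndex a && PySem.List.pyGetD (pvParts a) 1 "" == current_hash)),
         ("incompatible", ys ++ l.filter (fun a => pvIsIndex a && PySem.List.pyGetD (pvParts a) 1 "" != current_hash)),
         ("unknown", zs ++ l.filter (fun a => !pvIsIndex a))] := by
  induction l generalizing xs ys zs with
  | nil => simp
  | cons a l ih =>
    by_cases hidx : pvIsIndex a = true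
    · have hcond : 4 ≤ (pvParts a).length ∧ (pvParts a).headD "" = "index" := by
        simpa [pvIsIndex, Bool.and_eq_true, decide_eq_true_iff] using hidx
      by_cases hh : PySem.List.pyGetD (pvParts a) 1 "" = current_hash
      · have hstep : pvStepA current_hash
            (PySem.Dict.mk [("compatible", xs), ("incompatible", ys), ("unknown", zs)]) a
            = PySem.Dict.mk [("compatible", xs ++ [a]), ("incompatible", ys), ("unknown", zs)] := by
          simp only [pvParts] at hcond hh
          simp only [pvStepA]
          rw [if_pos hcond, if_pos hh, pvModC]
        simp only [List.foldl_cons, hstep, ih, List.filter_cons]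
        simp [hidx, hh, bne]
      · have hstep : pvStepA current_hash
            (PySem.Dict.mk [("compatible", xs), ("incompatible", ys), ("unknown", zs)]) a
            = PySem.Dict.mk [("compatible", xs), ("incompatible", ys ++ [a]), ("unknown", zs)] := by
          simp only [pvParts] at hcond hh
          simp only [pvStepA]
          rw [if_pos hcond, if_neg hh, pvModI]
        simp only [List.foldl_cons, hstep, ih, List.filter_cons]
        simp [hidx, hh, bne]
    · have hcond : ¬ (4 ≤ (pvParts a).length ∧ (pvParts a).headD "" = "index") := by
        intro hc
        exact hidx (by simpa [pvIsIndex, Bool.and_eq_true, decide_eq_true_iff] using hc)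
      have hstep : pvStepA current_hash
          (PySem.Dict.mk [("compatible", xs), ("incompatible", ys), ("unknown", zs)]) a
          = PySem.Dict.mk [("compatible", xs), ("incompatible", ys), ("unknown", zs ++ [a])] := by
        simp only [pvParts] at hcond
        simp only [pvStepA]
        rw [if_neg hcond, pvModU]
      simp only [List.foldl_cons, hstep, ih, List.filter_cons]
      simp [hidx]

-- ===== VERDICT (by name: the statement is the Claim_ definition above) =====
theorem categorize_artifacts_spec : Claim_equal_categorize_artifacts := by
  intro artifacts current_hash _ _
  show categorize_artifacts artifacts current_hash = categorize_artifacts_alt artifacts current_hash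
  simp [categorize_artifacts, categorize_artifacts_alt, pvFold_inv]
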